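-- pv_equiv track=rewrite | github.com/verbal-noun/COMP10001 | Bushfire-Simulation/Determine-if-a-cell-starts-burning.py | windflow
-- ===== SOURCE A (Python) =====
-- def dimension(length):
--     dimensions = []
--     for x in range(length):
--         for y in range(length):
--             coordinate = [x, y]
--             dimensions.append(coordinate)
--     return dimensions
--
-- def windflow(grid, coordinate, wind):
--     cell = []
--     wind_adj = []
--     x, y = coordinate[0], coordinate[1]
--     dimensions = dimension(grid)
--
--     if (wind == 'N'):
--         for i in range(y - 1, y + 2):
--             pair = [x - 2, i]
--             cell.append(pair)
--     elif (wind == 'S'):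
--         for i in range(y - 1, y + 2):
--             pair = [x + 2, i]
--             cell.append(pair)
--     elif (wind == 'E'):
--         for i in range(x - 1, x + 2):
--             pair = [i, y + 2]
--             cell.append(pair)
--     elif (wind == 'W'):
--         for i in range(x - 1, x + 2):
--             pair = [i, y - 2]
--             cell.append(pair)
--     elif (wind == 'NW'):
--         cell.append([x - 1, y - 2])
--         cell.append([x - 2, y - 2])
--         cell.append([x - 2, y - 1])
--     elif (wind == 'NE'):
--         cell.append([x - 1, y + 2])
--         cell.append([x - 2, y + 2])
--         cell.append([x - 2, y + 1])
--     elif (wind == 'SE'):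
--         cell.append([x + 1, y + 2])
--         cell.append([x + 2, y + 2])
--         cell.append([x + 2, y + 1])
--     elif (wind == 'SW'):
--         cell.append([x + 1, y - 2])
--         cell.append([x + 2, y - 2])
--         cell.append([x + 2, y - 1])
--
--     for item in cell:
--         if item in dimensions:
--             wind_adj.append(item)
--
--     return wind_adj
-- ===== SOURCE B (Python) =====
-- WIND_OFFSETS = {
--     'N':  [(-2, -1), (-2, 0), (-2, 1)],
--     'S':  [(2, -1), (2, 0), (2, 1)],
--     'E':  [(-1, 2), (0, 2), (1, 2)],
--     'W':  [(-1, -2), (0, -2), (1, -2)],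
--     'NW': [(-1, -2), (-2, -2), (-2, -1)],
--     'NE': [(-1, 2), (-2, 2), (-2, 1)],
--     'SE': [(1, 2), (2, 2), (2, 1)],
--     'SW': [(1, -2), (2, -2), (2, -1)],
-- }
--
-- def windflow(grid, coordinate, wind):
--     x, y = coordinate[0], coordinate[1]
--     return [[x + dx, y + dy] for dx, dy in WIND_OFFSETS.get(wind, [])
--             if 0 <= x + dx < grid and 0 <= y + dy < grid]
-- ===== Notes on version B (the rewrite author's own statement) =====
-- stated objective: alternative
-- what changed: B replaces building the full grid*grid coordinate list and testing each candidate by linear list membership with a per-wind offset table and a direct bounds check per candidate.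
import Mathlib
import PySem

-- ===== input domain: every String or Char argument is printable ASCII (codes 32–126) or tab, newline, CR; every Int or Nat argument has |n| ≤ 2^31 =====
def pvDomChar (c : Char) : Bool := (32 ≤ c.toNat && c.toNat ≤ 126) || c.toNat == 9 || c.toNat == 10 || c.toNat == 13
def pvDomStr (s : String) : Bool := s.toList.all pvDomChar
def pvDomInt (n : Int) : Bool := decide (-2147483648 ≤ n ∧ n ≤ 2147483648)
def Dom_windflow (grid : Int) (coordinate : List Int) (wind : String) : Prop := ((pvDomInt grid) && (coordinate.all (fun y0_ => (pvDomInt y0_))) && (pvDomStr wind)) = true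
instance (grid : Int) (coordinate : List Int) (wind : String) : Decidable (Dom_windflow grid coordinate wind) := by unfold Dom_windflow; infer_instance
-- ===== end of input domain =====

-- B avoids A's grid*grid coordinate enumeration: an offset table and a direct bounds check per candidate.

-- ===== PORT A =====
-- helper 'dimension': builds the list of all [x, y] with 0 <= x, y < length
def dimensionPy (length : Int) : List (List Int) :=
  (PySem.List.pyRange 0 length 1).foldl
    (fun dims x =>
      (PySem.List.pyRange 0 length 1).foldl (fun dims y => dims ++ [[x, y]]) dims)
    []

def windflow (grid : Int) (coordinate : List Int) (wind : String) : List (List Int) :=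
  let x := PySem.List.pyGetD coordinate 0 0   -- coordinate[0]; Pre_ excludes the IndexError case
  let y := PySem.List.pyGetD coordinate 1 0   -- coordinate[1]
  let dimensions := dimensionPy grid
  let cell : List (List Int) :=
    if wind == "N" then
      (PySem.List.pyRange (y - 1) (y + 2) 1).foldl (fun c i => c ++ [[x - 2, i]]) []
    else if wind == "S" then
      (PySem.List.pyRange (y - 1) (y + 2) 1).foldl (fun c i => c ++ [[x + 2, i]]) []
    else if wind == "E" then
      (PySem.List.pyRange (x - 1) (x + 2) 1).foldl (fun c i => c ++ [[i, y + 2]]) []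
    else if wind == "W" then
      (PySem.List.pyRange (x - 1) (x + 2) 1).foldl (fun c i => c ++ [[i, y - 2]]) []
    else if wind == "NW" then
      [[x - 1, y - 2], [x - 2, y - 2], [x - 2, y - 1]]
    else if wind == "NE" then
      [[x - 1, y + 2], [x - 2, y + 2], [x - 2, y + 1]]
    else if wind == "SE" then
      [[x + 1, y + 2], [x + 2, y + 2], [x + 2, y + 1]]
    else if wind == "SW" then
      [[x + 1, y - 2], [x + 2, y - 2], [x + 2, y - 1]]
    else []
  cell.foldl (fun acc item => if item ∈ dimensions then acc ++ [item] else acc) []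

-- ===== PORT B =====
def windOffsets : PySem.Dict String (List (Int × Int)) :=
  PySem.Dict.ofList
    [("N",  [(-2, -1), (-2, 0), (-2, 1)]),
     ("S",  [(2, -1), (2, 0), (2, 1)]),
     ("E",  [(-1, 2), (0, 2), (1, 2)]),
     ("W",  [(-1, -2), (0, -2), (1, -2)]),
     ("NW", [(-1, -2), (-2, -2), (-2, -1)]),
     ("NE", [(-1, 2), (-2, 2), (-2, 1)]),
     ("SE", [(1, 2), (2, 2), (2, 1)]),
     ("SW", [(1, -2), (2, -2), (2, -1)])]

def windflow_alt (grid : Int) (coordinate : List Int) (wind : String) : List (List Int) :=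
  let x := PySem.List.pyGetD coordinate 0 0
  let y := PySem.List.pyGetD coordinate 1 0
  (PySem.Dict.getD windOffsets wind []).filterMap
    (fun p =>
      if 0 ≤ x + p.1 ∧ x + p.1 < grid ∧ 0 ≤ y + p.2 ∧ y + p.2 < grid then
        some [x + p.1, y + p.2]
      else none)

-- ===== PRECONDITION & SPEC =====
-- Pre_ excludes coordinates with fewer than two entries, on which A raises IndexError.
def Pre_windflow (grid : Int) (coordinate : List Int) (wind : String) : Prop :=
  2 ≤ coordinate.length

instance (grid : Int) (coordinate : List Int) (wind : String) : Decidable (Pre_windflow grid coordinate wind) := by unfold Pre_windflow; infer_instance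

def pvWitness_windflow : Int × List Int × String := (3, [1, 1], "N")

def Spec_windflow (grid : Int) (coordinate : List Int) (wind : String) (out : List (List Int)) : Prop := out = windflow_alt grid coordinate wind
instance (grid : Int) (coordinate : List Int) (wind : String) (out : List (List Int)) : Decidable (Spec_windflow grid coordinate wind out) := by unfold Spec_windflow; infer_instance

-- ===== CLAIM (what is proved, stated in full; the proofs are below) =====
def Claim_equal_windflow : Prop := ∀ (grid : Int) (coordinate : List Int) (wind : String), Dom_windflow grid coordinate wind → Pre_windflow grid coordinate wind → Spec_windflow grid coordinate wind (windflow grid coordinate wind)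

-- ===== LEMMAS AND PROOFS =====

lemma dimensionPy_eq (g : Int) :
    dimensionPy g = (PySem.List.pyRange 0 g 1).flatMap
      (fun x => (PySem.List.pyRange 0 g 1).map (fun y => [x, y])) := by
  unfold dimensionPy
  have h : ∀ (l : List Int) (x : Int) (dims : List (List Int)),
      l.foldl (fun dims y => dims ++ [[x, y]]) dims = dims ++ l.map (fun y => [x, y]) := by
    intro l x dims; exact PySem.List.foldl_append_singleton_eq_map _ l dims
  calc (PySem.List.pyRange 0 g 1).foldl
        (fun dims x => (PySem.List.pyRange 0 g 1).foldl (fun dims y => dims ++ [[x, y]]) dims) []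
      = (PySem.List.pyRange 0 g 1).foldl
        (fun dims x => dims ++ (PySem.List.pyRange 0 g 1).map (fun y => [x, y])) [] := by
        exact PySem.List.foldl_congr_mem _ _ _ _ (fun dims x _ => h _ x dims)
    _ = _ := by
        simpa using PySem.List.foldl_append_eq_flatMap
          (fun x => (PySem.List.pyRange 0 g 1).map (fun y => [x, y])) (PySem.List.pyRange 0 g 1) []

lemma mem_dimensionPy (g a b : Int) :
    [a, b] ∈ dimensionPy g ↔ (0 ≤ a ∧ a < g ∧ 0 ≤ b ∧ b < g) := by
  rw [dimensionPy_eq]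
  simp only [List.mem_flatMap, List.mem_map, PySem.List.mem_pyRange_one, List.cons.injEq,
    and_true]
  constructor
  · rintro ⟨x, hx, y, hy, rfl, rfl⟩; exact ⟨hx.1, hx.2, hy.1, hy.2⟩
  · rintro ⟨h1, h2, h3, h4⟩; exact ⟨a, ⟨h1, h2⟩, b, ⟨h3, h4⟩, rfl, rfl⟩

lemma range3 (y : Int) : PySem.List.pyRange (y - 1) (y + 2) 1 = [y - 1, y, y + 1] := by
  rw [PySem.List.pyRange_one_cons (by omega),
      show y - 1 + 1 = y by ring,
      PySem.List.pyRange_one_cons (by omega),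
      PySem.List.pyRange_one_cons (by omega),
      PySem.List.pyRange_one_eq_nil (by omega)]

-- A's filter-by-membership over mapped offsets equals B's bounds-checked comprehension.
lemma filter_offsets (g x y : Int) (offs : List (Int × Int)) (acc : List (List Int)) :
    (offs.map (fun p => [x + p.1, y + p.2])).foldl
      (fun acc item => if item ∈ dimensionPy g then acc ++ [item] else acc) acc
    = acc ++ offs.filterMap
        (fun p => if 0 ≤ x + p.1 ∧ x + p.1 < g ∧ 0 ≤ y + p.2 ∧ y + p.2 < g then
            some [x + p.1, y + p.2] else none) := by
  induction offs generalizing acc with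
  | nil => simp
  | cons p t ih =>
    simp only [List.map_cons, List.foldl_cons, List.filterMap_cons]
    rw [ih]
    by_cases h : 0 ≤ x + p.1 ∧ x + p.1 < g ∧ 0 ≤ y + p.2 ∧ y + p.2 < g
    · rw [if_pos ((mem_dimensionPy g _ _).mpr h), if_pos h]; simp
    · rw [if_neg (fun hm => h ((mem_dimensionPy g _ _).mp hm)), if_neg h]

-- ===== VERDICT (by name: the statement is the Claim_ definition above) =====
theorem windflow_spec : Claim_equal_windflow := by
  intro grid coordinate wind _ _
  show windflow grid coordinate wind = windflow_alt grid coordinate wind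
  simp only [windflow, windflow_alt]
  set x := PySem.List.pyGetD coordinate 0 0 with hx
  set y := PySem.List.pyGetD coordinate 1 0 with hy
  by_cases h1 : wind = "N"
  · subst h1
    simp only [show (("N" : String) == "N") = true by simp, if_true]
    rw [range3 y]
    rw [show ([y - 1, y, y + 1].foldl (fun c i => c ++ [[x - 2, i]]) [])
        = (([(-2, -1), (-2, 0), (-2, 1)] : List (Int × Int)).map (fun p => [x + p.1, y + p.2])) by
          simp [List.foldl]; try omega,
      filter_offsets,
      show PySem.Dict.getD windOffsets "N" [] = ([(-2, -1), (-2, 0), (-2, 1)] : List (Int × Int)) from by decide]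
    simp
  by_cases h2 : wind = "S"
  · subst h2
    simp only [show (("S" : String) == "N") = false by simp, Bool.false_eq_true, if_false]
    simp only [show (("S" : String) == "S") = true by simp, if_true]
    rw [range3 y]
    rw [show ([y - 1, y, y + 1].foldl (fun c i => c ++ [[x + 2, i]]) [])
        = (([(2, -1), (2, 0), (2, 1)] : List (Int × Int)).map (fun p => [x + p.1, y + p.2])) by
          simp [List.foldl]; try omega,
      filter_offsets,
      show PySem.Dict.getD windOffsets "S" [] = ([(2, -1), (2, 0), (2, 1)] : List (Int × Int)) from by decide]
    simp
  by_cases h3 : wind = "E"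
  · subst h3
    simp only [show (("E" : String) == "N") = false by simp, show (("E" : String) == "S") = false by simp, Bool.false_eq_true, if_false]
    simp only [show (("E" : String) == "E") = true by simp, if_true]
    rw [range3 x]
    rw [show ([x - 1, x, x + 1].foldl (fun c i => c ++ [[i, y + 2]]) [])
        = (([(-1, 2), (0, 2), (1, 2)] : List (Int × Int)).map (fun p => [x + p.1, y + p.2])) by
          simp [List.foldl]; try omega,
      filter_offsets,
      show PySem.Dict.getD windOffsets "E" [] = ([(-1, 2), (0, 2), (1, 2)] : List (Int × Int)) from by decide]
    simp
  by_cases h4 : wind = "W"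
  · subst h4
    simp only [show (("W" : String) == "N") = false by simp, show (("W" : String) == "S") = false by simp, show (("W" : String) == "E") = false by simp, Bool.false_eq_true, if_false]
    simp only [show (("W" : String) == "W") = true by simp, if_true]
    rw [range3 x]
    rw [show ([x - 1, x, x + 1].foldl (fun c i => c ++ [[i, y - 2]]) [])
        = (([(-1, -2), (0, -2), (1, -2)] : List (Int × Int)).map (fun p => [x + p.1, y + p.2])) by
          simp [List.foldl]; try omega,
      filter_offsets,
      show PySem.Dict.getD windOffsets "W" [] = ([(-1, -2), (0, -2), (1, -2)] : List (Int × Int)) from by decide]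
    simp
  by_cases h5 : wind = "NW"
  · subst h5
    simp only [show (("NW" : String) == "N") = false by simp, show (("NW" : String) == "S") = false by simp, show (("NW" : String) == "E") = false by simp, show (("NW" : String) == "W") = false by simp, Bool.false_eq_true, if_false]
    simp only [show (("NW" : String) == "NW") = true by simp, if_true]
    rw [show ([[x - 1, y - 2], [x - 2, y - 2], [x - 2, y - 1]])
        = (([(-1, -2), (-2, -2), (-2, -1)] : List (Int × Int)).map (fun p => [x + p.1, y + p.2])) by
          simp; try omega,
      filter_offsets,
      show PySem.Dict.getD windOffsets "NW" [] = ([(-1, -2), (-2, -2), (-2, -1)] : List (Int × Int)) from by decide]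
    simp
  by_cases h6 : wind = "NE"
  · subst h6
    simp only [show (("NE" : String) == "N") = false by simp, show (("NE" : String) == "S") = false by simp, show (("NE" : String) == "E") = false by simp, show (("NE" : String) == "W") = false by simp, show (("NE" : String) == "NW") = false by simp, Bool.false_eq_true, if_false]
    simp only [show (("NE" : String) == "NE") = true by simp, if_true]
    rw [show ([[x - 1, y + 2], [x - 2, y + 2], [x - 2, y + 1]])
        = (([(-1, 2), (-2, 2), (-2, 1)] : List (Int × Int)).map (fun p => [x + p.1, y + p.2])) by
          simp; try omega,
      filter_offsets,
      show PySem.Dict.getD windOffsets "NE" [] = ([(-1, 2), (-2, 2), (-2, 1)] : List (Int × Int)) from by decide]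
    simp
  by_cases h7 : wind = "SE"
  · subst h7
    simp only [show (("SE" : String) == "N") = false by simp, show (("SE" : String) == "S") = false by simp, show (("SE" : String) == "E") = false by simp, show (("SE" : String) == "W") = false by simp, show (("SE" : String) == "NW") = false by simp, show (("SE" : String) == "NE") = false by simp, Bool.false_eq_true, if_false]
    simp only [show (("SE" : String) == "SE") = true by simp, if_true]
    rw [show ([[x + 1, y + 2], [x + 2, y + 2], [x + 2, y + 1]])
        = (([(1, 2), (2, 2), (2, 1)] : List (Int × Int)).map (fun p => [x + p.1, y + p.2])) by
          simp; try omega,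
      filter_offsets,
      show PySem.Dict.getD windOffsets "SE" [] = ([(1, 2), (2, 2), (2, 1)] : List (Int × Int)) from by decide]
    simp
  by_cases h8 : wind = "SW"
  · subst h8
    simp only [show (("SW" : String) == "N") = false by simp, show (("SW" : String) == "S") = false by simp, show (("SW" : String) == "E") = false by simp, show (("SW" : String) == "W") = false by simp, show (("SW" : String) == "NW") = false by simp, show (("SW" : String) == "NE") = false by simp, show (("SW" : String) == "SE") = false by simp, Bool.false_eq_true, if_false]
    simp only [show (("SW" : String) == "SW") = true by simp, if_true]
    rw [show ([[x + 1, y - 2], [x + 2, y - 2], [x + 2, y - 1]])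
        = (([(1, -2), (2, -2), (2, -1)] : List (Int × Int)).map (fun p => [x + p.1, y + p.2])) by
          simp; try omega,
      filter_offsets,
      show PySem.Dict.getD windOffsets "SW" [] = ([(1, -2), (2, -2), (2, -1)] : List (Int × Int)) from by decide]
    simp
  simp only [show (wind == "N") = false by simp [h1], show (wind == "S") = false by simp [h2],
    show (wind == "E") = false by simp [h3], show (wind == "W") = false by simp [h4],
    show (wind == "NW") = false by simp [h5], show (wind == "NE") = false by simp [h6],
    show (wind == "SE") = false by simp [h7], show (wind == "SW") = false by simp [h8],
    Bool.false_eq_true, if_false]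
  have e : ∀ (k : String) (v : List (Int × Int)) (rest : List (String × List (Int × Int))),
      k ≠ wind → List.find? (fun p => p.1 == wind) ((k, v) :: rest)
        = List.find? (fun p => p.1 == wind) rest := by
    intro k v rest hk
    exact List.find?_cons_of_neg (by simp [hk])
  rw [show PySem.Dict.getD windOffsets wind []
      = (Option.map (fun q => q.2) (List.find? (fun p => p.1 == wind)
          ([("N", [(-2, -1), (-2, 0), (-2, 1)]), ("S", [(2, -1), (2, 0), (2, 1)]),
            ("E", [(-1, 2), (0, 2), (1, 2)]), ("W", [(-1, -2), (0, -2), (1, -2)]),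
            ("NW", [(-1, -2), (-2, -2), (-2, -1)]), ("NE", [(-1, 2), (-2, 2), (-2, 1)]),
            ("SE", [(1, 2), (2, 2), (2, 1)]), ("SW", [(1, -2), (2, -2), (2, -1)])]
              : List (String × List (Int × Int))))).getD [] from rfl,
    e _ _ _ (Ne.symm h1), e _ _ _ (Ne.symm h2), e _ _ _ (Ne.symm h3), e _ _ _ (Ne.symm h4),
    e _ _ _ (Ne.symm h5), e _ _ _ (Ne.symm h6), e _ _ _ (Ne.symm h7), e _ _ _ (Ne.symm h8)]
  rfl
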